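-- pv_equiv track=rewrite | github.com/Ivan29020/RRNS-Secret-Sharing | general_utils.py | check_threshold_property
-- ===== SOURCE A (Python) =====
-- from itertools import combinations
-- from math import prod
--
-- def check_threshold_property(moduli, secret, threshold_k):
--     """
--     Verifica la proprietà soglia:
--       - per ogni sottoinsieme S con |S| < threshold_k: prod(S) <= secret
--       - per ogni sottoinsieme S con |S| >= threshold_k: prod(S) > secret
--     """
--     n = len(moduli)
--     for r in range(1, n + 1):
--         for comb in combinations(moduli, r):
--             p = prod(comb)
--             if r < threshold_k:
--                 if p > secret:
--                     return False
--             else: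
--                 if p <= secret:
--                     return False
--     return True
-- ===== SOURCE B (Python) =====
-- def _extend(cell, x):
--     # best/worst products of the previous size, each multiplied by x
--     if cell is None:
--         return None
--     mx, mn = cell
--     return (max(mx * x, mn * x), min(mx * x, mn * x))
--
--
-- def _merge(a, b):
--     if a is None:
--         return b
--     if b is None:
--         return a
--     return (max(a[0], b[0]), min(a[1], b[1]))
--
--
-- def _row(prev, moduli):
--     # prev[i] = (max, min) product over size-(r-1) subsets of moduli[:i] (or None).
--     # Returns the same table for size r, plus its last cell (subsets of the whole list).
--     out = [None]
--     acc = None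
--     for p, x in zip(prev, moduli):
--         acc = _merge(acc, _extend(p, x))
--         out.append(acc)
--     return out, acc
--
--
-- def check_threshold_property(moduli, secret, threshold_k):
--     """DP by subset size: for each r keep only the max/min size-r product and test it."""
--     n = len(moduli)
--     row = [(1, 1)] * (n + 1)
--     for r in range(1, n + 1):
--         row, cell = _row(row, moduli)
--         if cell is not None:
--             mx, mn = cell
--             if r < threshold_k:
--                 if mx > secret:
--                     return False
--             else:
--                 if mn <= secret:
--                     return False
--     return True
-- ===== Notes on version B (the rewrite author's own statement) =====
-- stated objective: alternative
-- what changed: Replaced the exhaustive scan of all 2^n subsets with a knapsack-style DP that processes subset sizes incrementally, keeping for each size r only the maximum and minimum size-r product and testing those two extremes against the secret, stopping at the first failing size like A does.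
import Mathlib
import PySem

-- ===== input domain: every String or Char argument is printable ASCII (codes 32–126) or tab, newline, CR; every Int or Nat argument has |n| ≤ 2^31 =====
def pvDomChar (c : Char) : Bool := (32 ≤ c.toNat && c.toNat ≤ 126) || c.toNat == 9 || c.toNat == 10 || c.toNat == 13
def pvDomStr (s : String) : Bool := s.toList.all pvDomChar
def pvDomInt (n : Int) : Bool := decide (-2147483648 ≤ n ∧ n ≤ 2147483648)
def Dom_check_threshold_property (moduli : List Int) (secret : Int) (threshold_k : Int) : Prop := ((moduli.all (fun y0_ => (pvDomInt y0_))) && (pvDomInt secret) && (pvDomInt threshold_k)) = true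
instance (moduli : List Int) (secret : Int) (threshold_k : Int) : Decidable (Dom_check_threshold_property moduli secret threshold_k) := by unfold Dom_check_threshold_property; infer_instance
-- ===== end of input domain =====

-- B replaces A's scan of all 2^n subsets by a knapsack-style DP that, per subset
-- size r, keeps only the maximum and minimum subset product and tests those
-- extremes (objective: alternative algorithm; not measured faster).

-- ===== PORT A =====
-- itertools.combinations(l, r) in its lexicographic order (hand port, exact)
def pvCombinations : List Int → Nat → List (List Int)
  | _, 0 => [[]]
  | [], _ + 1 => []
  | x :: xs, r + 1 => (pvCombinations xs r).map (fun c => x :: c) ++ pvCombinations xs (r + 1)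

def check_threshold_property (moduli : List Int) (secret : Int) (threshold_k : Int) : Bool :=
  let n : Int := (moduli.length : Int)
  (PySem.List.pyRange 1 (n + 1) 1).all fun r =>
    (pvCombinations moduli r.toNat).all fun comb =>
      let p := comb.prod
      if r < threshold_k then decide (p ≤ secret) else decide (secret < p)

-- ===== PORT B =====
def pvExtend (cell : Option (Int × Int)) (x : Int) : Option (Int × Int) :=
  match cell with
  | none => none
  | some (mx, mn) => some (max (mx * x) (mn * x), min (mx * x) (mn * x))

def pvMerge (a b : Option (Int × Int)) : Option (Int × Int) :=
  match a, b with
  | none, b => b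
  | some a, none => some a
  | some (amx, amn), some (bmx, bmn) => some (max amx bmx, min amn bmn)

-- _row's loop over zip(prev, moduli); returns (cells appended after the leading None, final acc)
def pvRowGo : Option (Int × Int) → List (Option (Int × Int) × Int) → List (Option (Int × Int)) × Option (Int × Int)
  | acc, [] => ([], acc)
  | acc, (p, x) :: rest =>
    let acc' := pvMerge acc (pvExtend p x)
    let res := pvRowGo acc' rest
    (acc' :: res.1, res.2)

def pvRow (prev : List (Option (Int × Int))) (moduli : List Int) :
    List (Option (Int × Int)) × Option (Int × Int) :=
  let go := pvRowGo none (prev.zip moduli)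
  (none :: go.1, go.2)

-- the `for r in range(1, n + 1)` loop with its early returns
def pvLoop (moduli : List Int) (secret threshold_k : Int) :
    List Int → List (Option (Int × Int)) → Bool
  | [], _ => true
  | r :: rs, row =>
    let rc := pvRow row moduli
    match rc.2 with
    | none => pvLoop moduli secret threshold_k rs rc.1
    | some (mx, mn) =>
      if r < threshold_k then
        if secret < mx then false else pvLoop moduli secret threshold_k rs rc.1
      else
        if mn ≤ secret then false else pvLoop moduli secret threshold_k rs rc.1

def check_threshold_property_alt (moduli : List Int) (secret : Int) (threshold_k : Int) : Bool :=
  let n : Int := (moduli.length : Int)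
  pvLoop moduli secret threshold_k (PySem.List.pyRange 1 (n + 1) 1)
    (List.replicate (moduli.length + 1) (some (1, 1)))

-- ===== PRECONDITION & SPEC =====
def Spec_check_threshold_property (moduli : List Int) (secret : Int) (threshold_k : Int) (out : Bool) : Prop := out = check_threshold_property_alt moduli secret threshold_k
instance (moduli : List Int) (secret : Int) (threshold_k : Int) (out : Bool) : Decidable (Spec_check_threshold_property moduli secret threshold_k out) := by unfold Spec_check_threshold_property; infer_instance

-- ===== CLAIM (what is proved, stated in full; the proofs are below) =====
def Claim_equal_check_threshold_property : Prop := ∀ (moduli : List Int) (secret : Int) (threshold_k : Int), Dom_check_threshold_property moduli secret threshold_k → Spec_check_threshold_property moduli secret threshold_k (check_threshold_property moduli secret threshold_k)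

-- ===== LEMMAS AND PROOFS =====

-- products of all size-r combinations
def pvProds (l : List Int) (r : Nat) : List Int := (pvCombinations l r).map List.prod

-- what a dp cell means for a list of products
def InvFor (ps : List Int) (c : Option (Int × Int)) : Prop :=
  match c with
  | none => ps = []
  | some (mx, mn) => mx ∈ ps ∧ mn ∈ ps ∧ ∀ p ∈ ps, mn ≤ p ∧ p ≤ mx

lemma prods_zero (l : List Int) : pvProds l 0 = [1] := by
  simp [pvProds, pvCombinations]

lemma prods_cons (x : Int) (l : List Int) (r : Nat) :
    pvProds (x :: l) (r + 1) = (pvProds l r).map (fun p => x * p) ++ pvProds l (r + 1) := by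
  simp [pvProds, pvCombinations, Function.comp_def]

lemma invFor_extend (ps : List Int) (c : Option (Int × Int)) (x : Int) (h : InvFor ps c) :
    InvFor (ps.map (fun p => x * p)) (pvExtend c x) := by
  cases c with
  | none => simp [InvFor] at h; simp [InvFor, pvExtend, h]
  | some mm =>
    obtain ⟨mx, mn⟩ := mm
    obtain ⟨h1, h2, h3⟩ := h
    refine ⟨?_, ?_, ?_⟩
    · rcases max_choice (mx * x) (mn * x) with h | h <;> rw [h]
      · exact List.mem_map.2 ⟨mx, h1, by ring⟩
      · exact List.mem_map.2 ⟨mn, h2, by ring⟩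
    · rcases min_choice (mx * x) (mn * x) with h | h <;> rw [h]
      · exact List.mem_map.2 ⟨mx, h1, by ring⟩
      · exact List.mem_map.2 ⟨mn, h2, by ring⟩
    · intro p hp
      obtain ⟨q, hq, rfl⟩ := List.mem_map.1 hp
      obtain ⟨hq1, hq2⟩ := h3 q hq
      rcases le_total 0 x with hx | hx
      · constructor
        · exact le_trans (min_le_right _ _) (by nlinarith)
        · exact le_trans (by nlinarith) (le_max_left _ _)
      · constructor
        · exact le_trans (min_le_left _ _) (by nlinarith)
        · exact le_trans (by nlinarith) (le_max_right _ _)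

lemma invFor_merge (L1 L2 : List Int) (c1 c2 : Option (Int × Int))
    (h1 : InvFor L1 c1) (h2 : InvFor L2 c2) : InvFor (L2 ++ L1) (pvMerge c1 c2) := by
  cases c1 with
  | none =>
    simp [InvFor] at h1; subst h1
    cases c2 with
    | none => simp [InvFor] at h2 ⊢; exact h2
    | some mm =>
      obtain ⟨mx, mn⟩ := mm
      obtain ⟨g1, g2, g3⟩ := h2
      exact ⟨by simp [g1], by simp [g2], by intro p hp; simp at hp; exact g3 p hp⟩
  | some mm =>
    obtain ⟨amx, amn⟩ := mm
    obtain ⟨f1, f2, f3⟩ := h1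
    cases c2 with
    | none =>
      simp [InvFor] at h2; subst h2
      exact ⟨by simp [f1], by simp [f2], by intro p hp; simp at hp; exact f3 p hp⟩
    | some mm2 =>
      obtain ⟨bmx, bmn⟩ := mm2
      obtain ⟨g1, g2, g3⟩ := h2
      refine ⟨?_, ?_, ?_⟩
      · rcases max_choice amx bmx with h | h <;> rw [h] <;> simp [f1, g1]
      · rcases min_choice amn bmn with h | h <;> rw [h] <;> simp [f2, g2]
      · intro p hp
        rcases List.mem_append.1 hp with hp | hp
        · obtain ⟨u1, u2⟩ := g3 p hp
          exact ⟨le_trans (min_le_right _ _) u1, le_trans u2 (le_max_right _ _)⟩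
        · obtain ⟨u1, u2⟩ := f3 p hp
          exact ⟨le_trans (min_le_left _ _) u1, le_trans u2 (le_max_left _ _)⟩

lemma invFor_congr (P Q : List Int) (c : Option (Int × Int))
    (h : ∀ a, a ∈ P ↔ a ∈ Q) (hP : InvFor P c) : InvFor Q c := by
  cases c with
  | none =>
    simp [InvFor] at hP ⊢
    rw [List.eq_nil_iff_forall_not_mem]
    intro a ha
    rw [hP] at h
    simpa using (h a).2 ha
  | some mm =>
    obtain ⟨mx, mn⟩ := mm
    obtain ⟨h1, h2, h3⟩ := hP
    exact ⟨(h mx).1 h1, (h mn).1 h2, fun p hp => h3 p ((h p).2 hp)⟩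

lemma mem_prods_append : ∀ (L : List Int) (x : Int) (r : Nat) (a : Int),
    a ∈ pvProds (L ++ [x]) (r + 1) ↔
      (∃ q ∈ pvProds L r, a = x * q) ∨ a ∈ pvProds L (r + 1) := by
  intro L
  induction L with
  | nil =>
    intro x r a
    cases r with
    | zero => simp [pvProds, pvCombinations]
    | succ r' => simp [pvProds, pvCombinations]
  | cons y L ih =>
    intro x r a
    cases r with
    | zero =>
      simp only [List.cons_append, prods_cons, prods_zero, ih, List.mem_append,
        List.mem_map, List.mem_cons, List.not_mem_nil, or_false,
        mul_one, exists_eq_left]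
      tauto
    | succ r' =>
      rw [List.cons_append, prods_cons, prods_cons, prods_cons]
      simp only [List.mem_append, List.mem_map, ih]
      constructor
      · rintro (⟨b, hb, rfl⟩ | ⟨q, hq, rfl⟩ | h)
        · rcases hb with ⟨q, hq, rfl⟩ | hb
          · exact Or.inl ⟨y * q, Or.inl ⟨q, hq, rfl⟩, by ring⟩
          · exact Or.inr (Or.inl ⟨b, hb, rfl⟩)
        · exact Or.inl ⟨q, Or.inr hq, rfl⟩
        · exact Or.inr (Or.inr h)
      · rintro (⟨q, hq, rfl⟩ | ⟨w, hw, rfl⟩ | h)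
        · rcases hq with ⟨w, hw, rfl⟩ | hq
          · exact Or.inl ⟨x * w, Or.inl ⟨w, hw, rfl⟩, by ring⟩
          · exact Or.inr (Or.inl ⟨q, hq, rfl⟩)
        · exact Or.inl ⟨w, Or.inr hw, rfl⟩
        · exact Or.inr (Or.inr h)

-- row cells aligned with prefixes: cell j covers products of size r drawn from L ++ (first j of xs)
def Aligned (r : Nat) : List Int → List Int → List (Option (Int × Int)) → Prop
  | _, [], _ => True
  | _, _ :: _, [] => False
  | L, x :: xs, c :: cs => InvFor (pvProds L r) c ∧ Aligned r (L ++ [x]) xs cs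

lemma rowGo_inv (r : Nat) : ∀ (xs : List Int) (prev : List (Option (Int × Int)))
    (L : List Int) (acc : Option (Int × Int)),
    InvFor (pvProds L (r + 1)) acc → Aligned r L xs prev →
    Aligned (r + 1) L xs (acc :: (pvRowGo acc (prev.zip xs)).1) ∧
    InvFor (pvProds (L ++ xs) (r + 1)) (pvRowGo acc (prev.zip xs)).2 := by
  intro xs
  induction xs with
  | nil =>
    intro prev L acc hacc _
    constructor
    · trivial
    · simpa [pvRowGo] using hacc
  | cons x xs' ih =>
    intro prev L acc hacc hal
    cases prev with
    | nil => exact False.elim hal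
    | cons p ps =>
      obtain ⟨hp, hal'⟩ := hal
      have hacc' : InvFor (pvProds (L ++ [x]) (r + 1)) (pvMerge acc (pvExtend p x)) := by
        have hmem : ∀ a, a ∈ (pvProds L r).map (fun p => x * p) ++ pvProds L (r + 1) ↔
            a ∈ pvProds (L ++ [x]) (r + 1) := by
          intro a
          rw [mem_prods_append, List.mem_append, List.mem_map]
          constructor
          · rintro (⟨q, hq, rfl⟩ | h)
            · exact Or.inl ⟨q, hq, rfl⟩
            · exact Or.inr h
          · rintro (⟨q, hq, rfl⟩ | h)
            · exact Or.inl ⟨q, hq, rfl⟩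
            · exact Or.inr h
        exact invFor_congr _ _ _ hmem (invFor_merge _ _ _ _ hacc (invFor_extend _ _ x hp))
      have hmain := ih ps (L ++ [x]) (pvMerge acc (pvExtend p x)) hacc' hal'
      constructor
      · exact ⟨hacc, by simpa [pvRowGo] using hmain.1⟩
      · simpa [pvRowGo] using hmain.2

lemma aligned_init : ∀ (xs L : List Int) (m : Nat), xs.length ≤ m →
    Aligned 0 L xs (List.replicate m (some ((1 : Int), (1 : Int)))) := by
  intro xs
  induction xs with
  | nil => intro L m _; trivial
  | cons x xs' ih =>
    intro L m h
    cases m with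
    | zero => simp at h
    | succ m' =>
      rw [List.replicate_succ]
      refine ⟨?_, ih (L ++ [x]) m' (by simpa using h)⟩
      rw [prods_zero]
      simp [InvFor]

def cellBool (secret k : Int) (j : Nat) (cell : Option (Int × Int)) : Bool :=
  match cell with
  | none => true
  | some (mx, mn) => if ((j : Int)) < k then decide (mx ≤ secret) else decide (secret < mn)

lemma cell_check (moduli : List Int) (secret k : Int) (j : Nat) (cell : Option (Int × Int))
    (h : InvFor (pvProds moduli j) cell) :
    ((pvCombinations moduli j).all fun comb =>
        if ((j : Int)) < k then decide (comb.prod ≤ secret) else decide (secret < comb.prod)) =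
    cellBool secret k j cell := by
  unfold cellBool
  rw [Bool.eq_iff_iff]
  cases cell with
  | none =>
    have hcomb : pvCombinations moduli j = [] := by
      have : pvProds moduli j = [] := h
      simpa [pvProds] using this
    simp [hcomb]
  | some mm =>
    obtain ⟨mx, mn⟩ := mm
    obtain ⟨h1, h2, h3⟩ := h
    simp only [List.all_eq_true]
    by_cases hk : ((j : Int)) < k
    · simp only [if_pos hk, decide_eq_true_eq]
      constructor
      · intro hall
        obtain ⟨comb, hc, hpc⟩ := List.mem_map.1 h1
        exact hpc ▸ hall comb hc
      · intro hmx comb hc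
        exact le_trans (h3 comb.prod (List.mem_map.2 ⟨comb, hc, rfl⟩)).2 hmx
    · simp only [if_neg hk, decide_eq_true_eq]
      constructor
      · intro hall
        obtain ⟨comb, hc, hpc⟩ := List.mem_map.1 h2
        exact hpc ▸ hall comb hc
      · intro hmn comb hc
        exact lt_of_lt_of_le hmn (h3 comb.prod (List.mem_map.2 ⟨comb, hc, rfl⟩)).1

lemma loop_eq (moduli : List Int) (secret k : Int) :
    ∀ (c t : Nat) (row : List (Option (Int × Int))), t + c = moduli.length →
      Aligned t [] moduli row →
      pvLoop moduli secret k (PySem.List.pyRange ((t : Int) + 1) ((moduli.length : Int) + 1) 1) row =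
      (PySem.List.pyRange ((t : Int) + 1) ((moduli.length : Int) + 1) 1).all
        (fun r => (pvCombinations moduli r.toNat).all fun comb =>
          if r < k then decide (comb.prod ≤ secret) else decide (secret < comb.prod)) := by
  intro c
  induction c with
  | zero =>
    intro t row ht _
    rw [PySem.List.pyRange_one_eq_nil (by omega)]
    rfl
  | succ c' ih =>
    intro t row ht hal
    rw [PySem.List.pyRange_one_cons (by omega)]
    have haccnil : InvFor (pvProds ([] : List Int) (t + 1)) (none : Option (Int × Int)) := by
      simp [InvFor, pvProds, pvCombinations]
    have hrow := rowGo_inv t moduli row [] none haccnil hal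
    have hcell : InvFor (pvProds moduli (t + 1)) (pvRowGo none (row.zip moduli)).2 := by
      simpa using hrow.2
    have hkey := cell_check moduli secret k (t + 1) _ hcell
    have hcast : (((t + 1 : Nat)) : Int) = (t : Int) + 1 := by push_cast; ring
    have htn : ((t : Int) + 1).toNat = t + 1 := by omega
    have hnext := ih (t + 1) (none :: (pvRowGo none (row.zip moduli)).1) (by omega) hrow.1
    rw [hcast] at hnext
    simp only [pvLoop, pvRow, List.all_cons, htn]
    cases hc : (pvRowGo none (row.zip moduli)).2 with
    | none =>
      rw [hc] at hkey
      simp only [cellBool] at hkey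
      rw [hcast] at hkey
      simp only [hkey, Bool.true_and]
      exact hnext
    | some mm =>
      obtain ⟨mx, mn⟩ := mm
      rw [hc] at hkey
      simp only [cellBool] at hkey
      rw [hcast] at hkey
      rw [hkey]
      by_cases hk : (t : Int) + 1 < k
      · by_cases hs : secret < mx
        · have hmx : decide (mx ≤ secret) = false := by
            simp only [decide_eq_false_iff_not]; omega
          simp only [if_pos hk, if_pos hs, hmx, Bool.false_and]
        · have hmx : decide (mx ≤ secret) = true := by
            simp only [decide_eq_true_eq]; omega
          simp only [if_pos hk, if_neg hs, hmx, Bool.true_and]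
          exact hnext
      · by_cases hs : mn ≤ secret
        · have hmn : decide (secret < mn) = false := by
            simp only [decide_eq_false_iff_not]; omega
          simp only [if_neg hk, if_pos hs, hmn, Bool.false_and]
        · have hmn : decide (secret < mn) = true := by
            simp only [decide_eq_true_eq]; omega
          simp only [if_neg hk, if_neg hs, hmn, Bool.true_and]
          exact hnext

-- ===== VERDICT (by name: the statement is the Claim_ definition above) =====
theorem check_threshold_property_spec : Claim_equal_check_threshold_property := by
  intro moduli secret k _
  unfold Spec_check_threshold_property check_threshold_property check_threshold_property_alt
  have := (loop_eq moduli secret k moduli.length 0 (List.replicate (moduli.length + 1) (some (1, 1)))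
    (by omega) (aligned_init moduli [] (moduli.length + 1) (by omega))).symm
  simpa using this
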